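-- pv_equiv track=rewrite | github.com/Nike00000/CredsDetect | parsers/asn1_parser.py | parse_object_identifier
-- ===== SOURCE A (Python) =====
-- def parse_object_identifier(object_bytes) -> str:
--     """Parse OBJECT IDENTIFIER"""
--     if len(object_bytes) == 0:
--         return ""
--
--     oid_parts = []
--
--     # First byte: X * 40 + Y
--     first_byte = object_bytes[0]
--     oid_parts.append(str(first_byte // 40))
--     oid_parts.append(str(first_byte % 40))
--
--     # Another bytes
--     current_value = 0
--     for i in range(1, len(object_bytes)):
--         byte_val = object_bytes[i]
--         current_value = (current_value << 7) | (byte_val & 0x7F)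
--
--         if not (byte_val & 0x80):  # Last bytes number
--             oid_parts.append(str(current_value))
--             current_value = 0
--
--     return '.'.join(oid_parts)
-- ===== SOURCE B (Python) =====
-- def parse_object_identifier(object_bytes) -> str:
--     """Parse OBJECT IDENTIFIER (two-pass: partition into groups, then decode each)"""
--     if len(object_bytes) == 0:
--         return ""
--     first = object_bytes[0]
--     # pass 1: split the tail into complete base-128 subidentifier groups,
--     # dropping a trailing unterminated group
--     groups = []
--     cur = []
--     for b in object_bytes[1:]:
--         cur.append(b)
--         if not (b & 0x80):
--             groups.append(cur)
--             cur = []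
--     # pass 2: decode each group and stringify
--     vals = [first // 40, first % 40]
--     for g in groups:
--         v = 0
--         for b in g:
--             v = (v << 7) | (b & 0x7F)
--         vals.append(v)
--     return '.'.join(str(v) for v in vals)
-- ===== Notes on version B (the rewrite author's own statement) =====
-- stated objective: alternative
-- what changed: B replaces A's single fused loop carrying a running current_value with a two-pass decomposition: first partition the tail bytes into complete subidentifier groups (dropping any unterminated trailing group), then decode each group to its integer and join.
import Mathlib
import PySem

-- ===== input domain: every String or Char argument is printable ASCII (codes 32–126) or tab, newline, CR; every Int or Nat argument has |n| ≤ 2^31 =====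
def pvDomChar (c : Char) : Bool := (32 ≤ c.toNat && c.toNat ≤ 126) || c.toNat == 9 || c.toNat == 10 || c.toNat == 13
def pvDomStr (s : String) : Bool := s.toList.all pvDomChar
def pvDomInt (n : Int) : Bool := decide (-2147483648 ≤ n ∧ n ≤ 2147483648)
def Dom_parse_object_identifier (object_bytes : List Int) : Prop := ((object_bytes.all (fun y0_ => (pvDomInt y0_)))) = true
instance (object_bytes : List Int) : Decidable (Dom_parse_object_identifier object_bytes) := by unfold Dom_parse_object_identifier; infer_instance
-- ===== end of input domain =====

-- B is an alternative decomposition (two passes: group, then decode) of A's fused loop; same cost.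

-- ===== PORT A =====
-- A's loop state: (oid_parts, current_value)
def pvStepA (st : List String × Int) (b : Int) : List String × Int :=
  let cv := PySem.Int.bor (st.2 <<< (7 : Nat)) (PySem.Int.band b 127)
  if PySem.Int.band b 128 = 0 then (st.1 ++ [PySem.Int.toStr cv], 0) else (st.1, cv)

def parse_object_identifier (object_bytes : List Int) : String :=
  match object_bytes with
  | [] => ""
  | first_byte :: rest =>
    let oid_parts := [PySem.Int.toStr (PySem.Int.floordiv first_byte 40),
                      PySem.Int.toStr (PySem.Int.mod first_byte 40)]
    let st := rest.foldl pvStepA (oid_parts, 0)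
    PySem.Str.join "." st.1

-- ===== PORT B =====
-- pass 1: partition into complete groups; state = (finished groups, current group)
def pvStepB (st : List (List Int) × List Int) (b : Int) : List (List Int) × List Int :=
  let cur := st.2 ++ [b]
  if PySem.Int.band b 128 = 0 then (st.1 ++ [cur], []) else (st.1, cur)

-- pass 2: decode one group
def pvGroupVal (g : List Int) : Int :=
  g.foldl (fun v b => PySem.Int.bor (v <<< (7 : Nat)) (PySem.Int.band b 127)) 0

def parse_object_identifier_alt (object_bytes : List Int) : String :=
  match object_bytes with
  | [] => ""
  | first :: rest =>
    let groups := (rest.foldl pvStepB ([], [])).1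
    let vals := [PySem.Int.floordiv first 40, PySem.Int.mod first 40] ++ groups.map pvGroupVal
    PySem.Str.join "." (vals.map PySem.Int.toStr)

-- ===== PRECONDITION & SPEC =====
def Spec_parse_object_identifier (object_bytes : List Int) (out : String) : Prop := out = parse_object_identifier_alt object_bytes
instance (object_bytes : List Int) (out : String) : Decidable (Spec_parse_object_identifier object_bytes out) := by unfold Spec_parse_object_identifier; infer_instance

-- ===== CLAIM (what is proved, stated in full; the proofs are below) =====
def Claim_equal_parse_object_identifier : Prop := ∀ (object_bytes : List Int), Dom_parse_object_identifier object_bytes → Spec_parse_object_identifier object_bytes (parse_object_identifier object_bytes)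

-- ===== LEMMAS AND PROOFS =====

-- appending a byte to a group folds into its value one step
theorem pvGroupVal_append (g : List Int) (b : Int) :
    pvGroupVal (g ++ [b]) = PySem.Int.bor (pvGroupVal g <<< (7 : Nat)) (PySem.Int.band b 127) := by
  simp [pvGroupVal]

-- the B fold's finished-groups accumulator factors out
theorem pvStepB_acc (bs : List Int) (gs : List (List Int)) (cur : List Int) :
    bs.foldl pvStepB (gs, cur) =
      (gs ++ (bs.foldl pvStepB ([], cur)).1, (bs.foldl pvStepB ([], cur)).2) := by
  induction bs generalizing gs cur with
  | nil => simp
  | cons b bs ih =>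
    simp only [List.foldl_cons, pvStepB]
    split
    · simp only [List.nil_append]
      rw [ih (gs ++ [cur ++ [b]]) [], ih [cur ++ [b]] []]; simp
    · exact ih gs (cur ++ [b])

-- main invariant: A's fused fold equals parts ++ stringified decoded groups of B's fold
theorem pv_main (bs : List Int) (parts : List String) (cur : List Int) :
    (bs.foldl pvStepA (parts, pvGroupVal cur)).1 =
      parts ++ ((bs.foldl pvStepB ([], cur)).1).map (fun g => PySem.Int.toStr (pvGroupVal g)) := by
  induction bs generalizing parts cur with
  | nil => simp
  | cons b bs ih =>
    simp only [List.foldl_cons, pvStepA, pvStepB]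
    rw [← pvGroupVal_append cur b]
    split
    · have h0 : (0 : Int) = pvGroupVal [] := by simp [pvGroupVal]
      simp only [List.nil_append]
      rw [h0, ih (parts ++ [PySem.Int.toStr (pvGroupVal (cur ++ [b]))]) [],
          pvStepB_acc bs [cur ++ [b]] []]
      simp
    · exact ih parts (cur ++ [b])

-- ===== VERDICT (by name: the statement is the Claim_ definition above) =====
theorem parse_object_identifier_spec : Claim_equal_parse_object_identifier := by
  intro object_bytes _
  unfold Spec_parse_object_identifier parse_object_identifier parse_object_identifier_alt
  match object_bytes with
  | [] => rfl
  | first :: rest =>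
    simp only []
    congr 1
    have h0 : (0 : Int) = pvGroupVal [] := by simp [pvGroupVal]
    rw [h0, pv_main rest _ []]
    simp
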